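-- pv_equiv track=rewrite | github.com/orcloveasagi/GeneralCrawler | core/utils.py | path_format
-- ===== SOURCE A (Python) =====
-- def path_format(path):
--     r_dir_filter = [
--         ('/', '_'),
--         ('\\', '_'),
--         (':', '：'),
--         ('*', '_'),
--         ('?', u'？'),
--         ('"', '_'),
--         ('<', '['),
--         ('>', ']'),
--         ('|', '_'),
--     ]
--     for filter_ele in r_dir_filter:
--         path = path.replace(filter_ele[0], filter_ele[1])
--     return path
-- ===== SOURCE B (Python) =====
-- def path_format(path):
--     table = str.maketrans({
--         '/': '_',
--         '\\': '_',
--         ':': '：',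
--         '*': '_',
--         '?': '？',
--         '"': '_',
--         '<': '[',
--         '>': ']',
--         '|': '_',
--     })
--     return path.translate(table)
-- ===== Notes on version B (the rewrite author's own statement) =====
-- stated objective: idiomatic
-- what changed: B builds one character translation table and does a single path.translate pass instead of nine sequential full-string str.replace scans.
import Mathlib
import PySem

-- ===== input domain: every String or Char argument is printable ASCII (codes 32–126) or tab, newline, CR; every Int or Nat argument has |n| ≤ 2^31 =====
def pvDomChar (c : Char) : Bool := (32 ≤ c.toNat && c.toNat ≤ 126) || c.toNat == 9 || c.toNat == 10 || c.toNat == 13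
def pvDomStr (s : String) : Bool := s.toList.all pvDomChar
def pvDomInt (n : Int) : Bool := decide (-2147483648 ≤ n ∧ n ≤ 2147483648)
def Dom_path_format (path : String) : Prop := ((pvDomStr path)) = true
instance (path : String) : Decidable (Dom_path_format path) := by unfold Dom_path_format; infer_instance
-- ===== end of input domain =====

-- B replaces A's nine sequential str.replace scans by one translation table and a single pass (idiomatic).

-- ===== PORT A =====
def path_format (path : String) : String :=
  let r_dir_filter : List (String × String) :=
    [("/", "_"), ("\\", "_"), (":", "："), ("*", "_"), ("?", "？"),
     ("\"", "_"), ("<", "["), (">", "]"), ("|", "_")]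
  r_dir_filter.foldl (fun p fe => PySem.Str.replace p fe.1 fe.2) path

-- ===== PORT B =====
-- the translation table built by str.maketrans (char key → replacement char)
def pvTable : List (Char × Char) :=
  [('/', '_'), ('\\', '_'), (':', '：'), ('*', '_'), ('?', '？'),
   ('"', '_'), ('<', '['), ('>', ']'), ('|', '_')]

-- path.translate(table): one pass, each char looked up in the table, kept if absent
def path_format_alt (path : String) : String :=
  String.ofList (path.toList.map (fun c => (pvTable.lookup c).getD c))

-- ===== PRECONDITION & SPEC =====
def Spec_path_format (path : String) (out : String) : Prop := out = path_format_alt path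
instance (path : String) (out : String) : Decidable (Spec_path_format path out) := by unfold Spec_path_format; infer_instance

-- ===== CLAIM (what is proved, stated in full; the proofs are below) =====
def Claim_equal_path_format : Prop := ∀ (path : String), Dom_path_format path → Spec_path_format path (path_format path)

-- ===== LEMMAS AND PROOFS =====

lemma go_single (a : Char) (bs : List Char) :
    ∀ (l : List Char) (fuel : Nat) (acc : List Char), l.length ≤ fuel →
      PySem.Chars.replace.go [a] bs fuel l acc
        = acc.reverse ++ l.flatMap (fun c => if c = a then bs else [c]) := by
  intro l
  induction l with
  | nil =>
      intro fuel acc _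
      cases fuel <;> simp [PySem.Chars.replace.go]
  | cons c t ih =>
      intro fuel acc h
      cases fuel with
      | zero => simp at h
      | succ fuel =>
          rw [PySem.Chars.replace.go]
          by_cases hac : c = a
          · subst hac
            have hp : ([c].isPrefixOf (c :: t)) = true := by simp [List.isPrefixOf]
            rw [hp]
            simp only [if_true, List.length_cons] at h ⊢
            rw [show List.drop ([].length + 1) (c :: t) = t from rfl, ih _ _ (by omega)]
            simp
          · have hne : ([a].isPrefixOf (c :: t)) = false := by
              simp [List.isPrefixOf]
              intro hh; exact hac hh.symm
            rw [hne]
            simp only [Bool.false_eq_true, if_false]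
            rw [ih _ _ (by simpa using Nat.le_of_succ_le_succ h)]
            simp [hac]

lemma replace_single (cs : List Char) (a b : Char) :
    PySem.Chars.replace cs [a] [b] = cs.map (fun c => if c = a then b else c) := by
  rw [PySem.Chars.replace]
  simp only [List.isEmpty_cons, Bool.false_eq_true, if_false]
  rw [go_single a [b] cs cs.length [] le_rfl]
  simp [List.flatMap_def]
  induction cs with
  | nil => simp
  | cons c t ih => by_cases h : c = a <;> simp [h, ih]

lemma str_replace_single (s a b : String) (ca cb : Char)
    (ha : a.toList = [ca]) (hb : b.toList = [cb]) :
    PySem.Str.replace s a b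
      = String.ofList (s.toList.map (fun c => if c = ca then cb else c)) := by
  rw [PySem.Str.replace, ha, hb, replace_single]

-- ===== VERDICT (by name: the statement is the Claim_ definition above) =====
set_option maxHeartbeats 1000000 in
theorem path_format_spec : Claim_equal_path_format := by
  intro path _
  show path_format path = path_format_alt path
  simp only [path_format, path_format_alt, List.foldl]
  rw [str_replace_single _ _ _ '|' '_' rfl rfl,
      str_replace_single _ _ _ '>' ']' rfl rfl,
      str_replace_single _ _ _ '<' '[' rfl rfl,
      str_replace_single _ _ _ '"' '_' rfl rfl,
      str_replace_single _ _ _ '?' '？' rfl rfl,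
      str_replace_single _ _ _ '*' '_' rfl rfl,
      str_replace_single _ _ _ ':' '：' rfl rfl,
      str_replace_single _ _ _ '\\' '_' rfl rfl,
      str_replace_single _ _ _ '/' '_' rfl rfl]
  simp only [String.toList_ofList, List.map_map]
  refine congrArg String.ofList (List.map_congr_left ?_)
  intro c _
  by_cases h1 : c = '/';  · subst h1; decide
  by_cases h2 : c = '\\'; · subst h2; decide
  by_cases h3 : c = ':';  · subst h3; decide
  by_cases h4 : c = '*';  · subst h4; decide
  by_cases h5 : c = '?';  · subst h5; decide
  by_cases h6 : c = '"';  · subst h6; decide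
  by_cases h7 : c = '<';  · subst h7; decide
  by_cases h8 : c = '>';  · subst h8; decide
  by_cases h9 : c = '|';  · subst h9; decide
  simp [pvTable, List.lookup, h1, h2, h3, h4, h5, h6, h7, h8, h9,
    beq_eq_false_iff_ne.mpr h1, beq_eq_false_iff_ne.mpr h2, beq_eq_false_iff_ne.mpr h3,
    beq_eq_false_iff_ne.mpr h4, beq_eq_false_iff_ne.mpr h5, beq_eq_false_iff_ne.mpr h6,
    beq_eq_false_iff_ne.mpr h7, beq_eq_false_iff_ne.mpr h8, beq_eq_false_iff_ne.mpr h9]
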